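-- pv_equiv track=rewrite | github.com/PLSE-Lab/Python-MLAPI-expl | python_sources/eda-on-spotify-top-songs-from-2010-2019.py | letterlength
-- ===== SOURCE A (Python) =====
-- def letterlength(a):           # Counting the length of the letters
--     length = 0
--     idx = 0
--     for i in a:
--         if i == '(':
--
--             break
--         elif i == '-':
--
--             break
--         length = length + 1
--         idx = idx + 1        # index when it breaks the for loop
--     if (('(' in a) | ('-' in a)):
--         length = length - a[0:idx].count(" ")
--     else :
--         length = length - a.count(" ")
--     return(length)
-- ===== SOURCE B (Python) =====
-- def letterlength(a):
--     # Two-phase: find the cut index (first '(' or '-', else end), then count non-space chars in the prefix.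
--     p = a.find('(')
--     q = a.find('-')
--     cuts = [i for i in (p, q) if i != -1]
--     cut = min(cuts) if cuts else len(a)
--     prefix = a[:cut]
--     return len(prefix) - prefix.count(' ')
-- ===== Notes on version B (the rewrite author's own statement) =====
-- stated objective: simpler
-- what changed: B separates boundary-finding (minimum of the str.find results for the two delimiter characters, defaulting to the string length) from counting (prefix length minus the space count of the prefix), replacing A's interleaved break-loop with dual counters plus a membership re-scan.
import Mathlib
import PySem

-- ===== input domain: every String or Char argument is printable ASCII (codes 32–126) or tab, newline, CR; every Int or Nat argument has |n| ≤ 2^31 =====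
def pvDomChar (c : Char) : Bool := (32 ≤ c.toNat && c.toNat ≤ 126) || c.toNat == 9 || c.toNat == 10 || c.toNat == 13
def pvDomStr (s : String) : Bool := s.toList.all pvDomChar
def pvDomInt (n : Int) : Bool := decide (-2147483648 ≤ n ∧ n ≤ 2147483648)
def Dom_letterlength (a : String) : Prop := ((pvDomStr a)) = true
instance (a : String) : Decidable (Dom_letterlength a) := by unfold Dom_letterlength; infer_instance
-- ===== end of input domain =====

-- B separates boundary-finding from counting; equivalence is exact (total functions).

-- ===== PORT A =====
-- A's for-loop with break, carrying both `length` and `idx` counters.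
def letterlengthLoop : List Char → Int → Int → Int × Int
  | [], length, idx => (length, idx)
  | c :: rest, length, idx =>
    if c = '(' then (length, idx)
    else if c = '-' then (length, idx)
    else letterlengthLoop rest (length + 1) (idx + 1)

def letterlength (a : String) : Int :=
  let r := letterlengthLoop a.toList 0 0
  let length := r.1
  let idx := r.2
  if PySem.Str.isIn "(" a || PySem.Str.isIn "-" a then
    length - (PySem.Str.count (PySem.Str.slice a (some 0) (some idx)) " " : Int)
  else
    length - (PySem.Str.count a " " : Int)

-- ===== PORT B =====
def letterlength_alt (a : String) : Int :=
  let p := PySem.Str.find a "("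
  let q := PySem.Str.find a "-"
  let cuts := [p, q].filter (fun i => i ≠ -1)
  let cut := match PySem.List.min? cuts (fun i => i) with
    | some m => m
    | none => (PySem.Str.len a : Int)
  let prefx := PySem.Str.slice a none (some cut)
  (PySem.Str.len prefx : Int) - (PySem.Str.count prefx " " : Int)

-- ===== PRECONDITION & SPEC =====
def Spec_letterlength (a : String) (out : Int) : Prop := out = letterlength_alt a
instance (a : String) (out : Int) : Decidable (Spec_letterlength a out) := by unfold Spec_letterlength; infer_instance

-- ===== CLAIM (what is proved, stated in full; the proofs are below) =====
def Claim_equal_letterlength : Prop := ∀ (a : String), Dom_letterlength a → Spec_letterlength a (letterlength a)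

-- ===== LEMMAS AND PROOFS =====

-- the predicate A's loop (and the common cut point) is governed by
def pvKeep (c : Char) : Bool := ¬ (c = '(' ∨ c = '-')

theorem letterlengthLoop_eq (l : List Char) : ∀ n m : Int,
    letterlengthLoop l n m = (n + ((l.takeWhile pvKeep).length : Int), m + ((l.takeWhile pvKeep).length : Int)) := by
  induction l with
  | nil => intro n m; simp [letterlengthLoop]
  | cons c rest ih =>
    intro n m
    by_cases h1 : c = '('
    · simp [letterlengthLoop, h1, pvKeep, List.takeWhile]
    · by_cases h2 : c = '-'
      · simp [letterlengthLoop, h2, pvKeep, List.takeWhile]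
      · simp [letterlengthLoop, h1, h2, pvKeep, List.takeWhile, ih]
        constructor <;> ring

theorem find_go_singleton (c : Char) (l : List Char) : ∀ k : Nat,
    PySem.Chars.find.go [c] l k =
      if c ∈ l then ((k : Int) + ((l.takeWhile (fun x => x ≠ c)).length : Int)) else -1 := by
  induction l with
  | nil => intro k; simp [PySem.Chars.find.go]
  | cons x rest ih =>
    intro k
    by_cases h : x = c
    · simp [PySem.Chars.find.go, List.isPrefixOf, h, List.takeWhile]
    · have hx : (c == x) = false := by simp [Ne.symm h]
      simp [PySem.Chars.find.go, List.isPrefixOf, hx, h, List.takeWhile, ih]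
      by_cases hm : c ∈ rest
      · simp [hm]; ring
      · simp [hm]
        exact fun he => absurd he.symm h

theorem find_singleton (c : Char) (l : List Char) :
    PySem.Chars.find l [c] = if c ∈ l then ((l.takeWhile (fun x => x ≠ c)).length : Int) else -1 := by
  have := find_go_singleton c l 0
  simpa [PySem.Chars.find] using this

theorem takeWhile_min (l : List Char) :
    (l.takeWhile pvKeep).length =
      min (l.takeWhile (fun x => x ≠ '(')).length (l.takeWhile (fun x => x ≠ '-')).length := by
  induction l with
  | nil => simp
  | cons x rest ih =>
    by_cases h1 : x = '('
    · simp [List.takeWhile, pvKeep, h1]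
    · by_cases h2 : x = '-'
      · simp [List.takeWhile, pvKeep, h2]
      · simp [List.takeWhile, pvKeep, h1, h2, ih]

theorem takeWhile_length_le (p : Char → Bool) (l : List Char) : (l.takeWhile p).length ≤ l.length :=
  (List.takeWhile_sublist p).length_le

theorem takeWhile_eq_self_of_not_mem (c : Char) (l : List Char) (h : c ∉ l) :
    l.takeWhile (fun x => x ≠ c) = l := by
  apply List.takeWhile_eq_self_iff.mpr
  intro x hx
  simp
  exact fun he => h (he ▸ hx)

theorem take_takeWhile_length (p : Char → Bool) (l : List Char) :
    l.take (l.takeWhile p).length = l.takeWhile p := by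
  induction l with
  | nil => simp
  | cons x rest ih =>
    by_cases h : p x
    · simp [List.takeWhile, h, ih]
    · simp [List.takeWhile, h]

theorem min?_pair (x y : Int) : PySem.List.min? [x, y] (fun i => i) = some (min x y) := by
  rcases lt_or_ge y x with h | h
  · simp [PySem.List.min?, List.foldl, h, min_eq_right h.le]
  · simp [PySem.List.min?, List.foldl, not_lt.mpr h, min_eq_left h]

theorem min?_single (x : Int) : PySem.List.min? [x] (fun i => i) = some x := by
  simp [PySem.List.min?, List.foldl]

theorem isIn_singleton (c : Char) (l : List Char) : PySem.Chars.isIn [c] l = decide (c ∈ l) := by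
  simp only [PySem.Chars.isIn, find_singleton]
  by_cases h : c ∈ l
  · simp [h]
  · simp [h]

theorem takeWhile_pvKeep_all (l : List Char) (h1 : '(' ∉ l) (h2 : '-' ∉ l) :
    l.takeWhile pvKeep = l := by
  apply List.takeWhile_eq_self_iff.mpr
  intro x hx
  simp [pvKeep]
  exact ⟨fun he => h1 (he ▸ hx), fun he => h2 (he ▸ hx)⟩

theorem cut_eq (a : String) :
    (match PySem.List.min? (([PySem.Str.find a "(", PySem.Str.find a "-"]).filter (fun i => i ≠ -1)) (fun i => i) with
      | some m => m
      | none => (PySem.Str.len a : Int)) = ((a.toList.takeWhile pvKeep).length : Int) := by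
  have hb1 : "(".toList = ['('] := rfl
  have hb2 : "-".toList = ['-'] := rfl
  have hmin := takeWhile_min a.toList
  have h1le := takeWhile_length_le (fun x => x ≠ '(') a.toList
  have h2le := takeWhile_length_le (fun x => x ≠ '-') a.toList
  by_cases m1 : '(' ∈ a.toList <;> by_cases m2 : '-' ∈ a.toList
  · simp [hb1, hb2, find_singleton, m1, m2, min?_pair]
    simp only [ne_eq, decide_not] at hmin
    simp [hmin, Nat.cast_min]
  · simp [hb1, hb2, find_singleton, m1, m2, min?_single]
    rw [takeWhile_eq_self_of_not_mem '-' a.toList m2] at hmin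
    simp only [ne_eq, decide_not] at hmin h1le h2le
    omega
  · simp [hb1, hb2, find_singleton, m1, m2, min?_single]
    rw [takeWhile_eq_self_of_not_mem '(' a.toList m1] at hmin
    simp only [ne_eq, decide_not] at hmin h1le h2le
    omega
  · rw [takeWhile_pvKeep_all a.toList m1 m2]
    simp [hb1, hb2, find_singleton, m1, m2, PySem.List.min?, String.length_toList]

-- ===== VERDICT (by name: the statement is the Claim_ definition above) =====
theorem letterlength_spec : Claim_equal_letterlength := by
  intro a _
  unfold Spec_letterlength letterlength letterlength_alt
  have hloop := letterlengthLoop_eq a.toList 0 0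
  have htake : PySem.List.slice a.toList none (some ((a.toList.takeWhile pvKeep).length : Int)) =
      a.toList.takeWhile pvKeep := by
    rw [PySem.List.slice_to_natCast, take_takeWhile_length]
  have hb1 : "(".toList = ['('] := rfl
  have hb2 : "-".toList = ['-'] := rfl
  by_cases m1 : '(' ∈ a.toList <;> by_cases m2 : '-' ∈ a.toList
  · simp only [cut_eq]
    simp [hloop, hb1, hb2, isIn_singleton, m1, m2, htake]
  · simp only [cut_eq]
    simp [hloop, hb1, hb2, isIn_singleton, m1, m2, htake]
  · simp only [cut_eq]
    simp [hloop, hb1, hb2, isIn_singleton, m1, m2, htake]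
  · have ht := takeWhile_pvKeep_all a.toList m1 m2
    simp only [cut_eq]
    simp [hloop, hb1, hb2, isIn_singleton, m1, m2, ht, String.length_toList]
    rw [← @String.length_toList a, List.take_length]
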